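-- pv_equiv track=rewrite | github.com/maxeonyx/comp421-project | util.py | get_width_height
-- ===== SOURCE A (Python) =====
-- def get_width_height(shape, d=0, color=False):
--     width = 1
--     height = 1
--     color_dim = 1 if color else 0
--     for dim in range(d, len(shape) - color_dim):
--         if dim % 2 == 0:
--             width *= shape[dim]
--         else:
--             height *= shape[dim]
--     return width, height
-- ===== SOURCE B (Python) =====
-- def _prod(xs):
--     p = 1
--     for x in xs:
--         p *= x
--     return p
--
--
-- def get_width_height(shape, d=0, color=False):
--     end = len(shape) - (1 if color else 0)
--     even_start = d if d % 2 == 0 else d + 1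
--     odd_start = d + 1 if d % 2 == 0 else d
--     return (_prod(shape[i] for i in range(even_start, end, 2)),
--             _prod(shape[i] for i in range(odd_start, end, 2)))
-- ===== Notes on version B (the rewrite author's own statement) =====
-- stated objective: idiomatic
-- what changed: Replaces the single scan with a per-index parity branch by two independent strided passes (one over the even dimensions, one over the odd ones), each reduced with a plain product.
import Mathlib
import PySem

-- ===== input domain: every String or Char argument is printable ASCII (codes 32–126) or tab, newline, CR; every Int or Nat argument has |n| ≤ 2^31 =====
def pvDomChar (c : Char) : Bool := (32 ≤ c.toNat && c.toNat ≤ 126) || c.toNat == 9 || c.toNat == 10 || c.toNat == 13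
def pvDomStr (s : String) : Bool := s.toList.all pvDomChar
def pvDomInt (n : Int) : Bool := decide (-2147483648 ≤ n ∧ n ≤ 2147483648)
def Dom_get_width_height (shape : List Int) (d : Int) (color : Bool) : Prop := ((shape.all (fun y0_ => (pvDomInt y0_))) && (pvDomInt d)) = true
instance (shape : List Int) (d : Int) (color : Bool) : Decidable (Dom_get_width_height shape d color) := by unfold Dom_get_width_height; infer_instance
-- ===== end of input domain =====

-- B splits A's single parity-branching scan into two independent strided passes (even dims, odd dims), each reduced by a plain product; same cost, more idiomatic.


-- ===== PORT A =====
def get_width_height (shape : List Int) (d : Int) (color : Bool) : Int × Int :=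
  let color_dim : Int := if color then 1 else 0
  (PySem.List.pyRange d ((shape.length : Int) - color_dim) 1).foldl
    (fun wh dim =>
      if PySem.Int.mod dim 2 == 0 then (wh.1 * PySem.List.pyGetD shape dim 0, wh.2)
      else (wh.1, wh.2 * PySem.List.pyGetD shape dim 0)) (1, 1)

-- ===== PORT B =====
-- _prod: plain product loop over a list
def pyProd (xs : List Int) : Int := xs.foldl (· * ·) 1

def get_width_height_alt (shape : List Int) (d : Int) (color : Bool) : Int × Int :=
  let e : Int := (shape.length : Int) - (if color then 1 else 0)
  let even_start : Int := if PySem.Int.mod d 2 == 0 then d else d + 1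
  let odd_start : Int := if PySem.Int.mod d 2 == 0 then d + 1 else d
  (pyProd ((PySem.List.pyRange even_start e 2).map (fun i => PySem.List.pyGetD shape i 0)),
   pyProd ((PySem.List.pyRange odd_start e 2).map (fun i => PySem.List.pyGetD shape i 0)))

-- ===== PRECONDITION & SPEC =====
-- Pre_ excludes exactly the inputs on which Python A raises IndexError: a negative start d
-- below -len(shape) while the loop range is non-empty (some shape[dim] access is out of range).
def Pre_get_width_height (shape : List Int) (d : Int) (color : Bool) : Prop :=
  -(shape.length : Int) ≤ d ∨ (shape.length : Int) - (if color then 1 else 0) ≤ d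
instance (shape : List Int) (d : Int) (color : Bool) : Decidable (Pre_get_width_height shape d color) := by unfold Pre_get_width_height; infer_instance

def pvWitness_get_width_height : List Int × Int × Bool := ([2, 3, 5], 0, false)

def Spec_get_width_height (shape : List Int) (d : Int) (color : Bool) (out : Int × Int) : Prop := out = get_width_height_alt shape d color
instance (shape : List Int) (d : Int) (color : Bool) (out : Int × Int) : Decidable (Spec_get_width_height shape d color out) := by unfold Spec_get_width_height; infer_instance

-- ===== CLAIM (what is proved, stated in full; the proofs are below) =====
def Claim_equal_get_width_height : Prop := ∀ (shape : List Int) (d : Int) (color : Bool), Dom_get_width_height shape d color → Pre_get_width_height shape d color → Spec_get_width_height shape d color (get_width_height shape d color)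

-- ===== LEMMAS AND PROOFS =====

-- an upward range with positive step and no room is empty
lemma pyRange_pos_empty (a b s : Int) (hs : 0 < s) (h : b ≤ a) :
    PySem.List.pyRange a b s = [] := by
  rw [PySem.List.pyRange_of_pos _ _ hs, if_neg (by omega)]
  simp

-- peeling the head off a step-2 range
lemma pyRange_two_cons (a b : Int) (h : a < b) :
    PySem.List.pyRange a b 2 = a :: PySem.List.pyRange (a + 2) b 2 := by
  rw [PySem.List.pyRange_of_pos _ _ (by omega : (0:Int) < 2),
      PySem.List.pyRange_of_pos _ _ (by omega : (0:Int) < 2)]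
  rw [if_pos h]
  have h1 : ((b - a + 2 - 1) / 2).toNat = ((b - a + 2 - 1) / 2 - 1).toNat + 1 := by omega
  rw [h1, List.range_succ_eq_map]
  simp only [List.map_cons, List.map_map, Nat.cast_zero, mul_zero, add_zero]
  have h2 : (if a + 2 < b then ((b - (a + 2) + 2 - 1) / 2).toNat else 0)
      = ((b - a + 2 - 1) / 2 - 1).toNat := by split_ifs <;> omega
  have h3 : ((fun k : Nat => a + 2 * (k : Int)) ∘ Nat.succ)
      = (fun k : Nat => a + 2 + 2 * (k : Int)) := by
    funext k; simp [Function.comp, Nat.succ_eq_add_one]; ring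
  rw [h2, h3]

-- the even-indexed elements of a unit-step range form a step-2 range
lemma filter_even_pyRange : ∀ (n : Nat) (d e : Int), (e - d).toNat ≤ n →
    (PySem.List.pyRange d e 1).filter (fun x => PySem.Int.mod x 2 == 0)
      = PySem.List.pyRange (if PySem.Int.mod d 2 == 0 then d else d + 1) e 2 := by
  intro n
  induction n with
  | zero =>
    intro d e h
    rw [pyRange_pos_empty d e 1 one_pos (by omega), List.filter_nil,
        pyRange_pos_empty _ e 2 (by omega) (by split_ifs <;> omega)]
  | succ m ih =>
    intro d e h
    by_cases hde : d < e
    · rw [PySem.List.pyRange_one_cons hde]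
      by_cases hd : d % 2 = 0
      · have h1 : (PySem.Int.mod d 2 == 0) = true := by simp [hd]
        have h2 : (PySem.Int.mod (d + 1) 2 == 0) = false := by
          simp; omega
        rw [List.filter_cons_of_pos (by simp only [h1]), ih (d + 1) e (by omega)]
        simp only [h1, h2, Bool.false_eq_true, if_true, if_false]
        rw [pyRange_two_cons d e hde, show d + 1 + 1 = d + 2 from by ring]
      · have h1 : (PySem.Int.mod d 2 == 0) = false := by simp; omega
        have h2 : (PySem.Int.mod (d + 1) 2 == 0) = true := by
          simp; omega
        rw [List.filter_cons_of_neg (by simp only [h1, Bool.false_eq_true, not_false_eq_true]), ih (d + 1) e (by omega)]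
        simp only [h1, h2, Bool.false_eq_true, if_true, if_false]
    · rw [pyRange_pos_empty d e 1 one_pos (by omega), List.filter_nil,
          pyRange_pos_empty _ e 2 (by omega) (by split_ifs <;> omega)]

-- the odd-indexed elements of a unit-step range form a step-2 range
lemma filter_odd_pyRange : ∀ (n : Nat) (d e : Int), (e - d).toNat ≤ n →
    (PySem.List.pyRange d e 1).filter (fun x => !(PySem.Int.mod x 2 == 0))
      = PySem.List.pyRange (if PySem.Int.mod d 2 == 0 then d + 1 else d) e 2 := by
  intro n
  induction n with
  | zero =>
    intro d e h
    rw [pyRange_pos_empty d e 1 one_pos (by omega), List.filter_nil,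
        pyRange_pos_empty _ e 2 (by omega) (by split_ifs <;> omega)]
  | succ m ih =>
    intro d e h
    by_cases hde : d < e
    · rw [PySem.List.pyRange_one_cons hde]
      by_cases hd : d % 2 = 0
      · have h1 : (PySem.Int.mod d 2 == 0) = true := by simp [hd]
        have h2 : (PySem.Int.mod (d + 1) 2 == 0) = false := by
          simp; omega
        rw [List.filter_cons_of_neg (by simp only [h1, Bool.not_true, Bool.false_eq_true, not_false_eq_true]), ih (d + 1) e (by omega)]
        simp only [h1, h2, Bool.false_eq_true, if_true, if_false]
      · have h1 : (PySem.Int.mod d 2 == 0) = false := by simp; omega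
        have h2 : (PySem.Int.mod (d + 1) 2 == 0) = true := by
          simp; omega
        rw [List.filter_cons_of_pos (by simp only [h1, Bool.not_false]), ih (d + 1) e (by omega)]
        simp only [h1, h2, Bool.false_eq_true, if_true, if_false]
        rw [pyRange_two_cons d e hde, show d + 1 + 1 = d + 2 from by ring]
    · rw [pyRange_pos_empty d e 1 one_pos (by omega), List.filter_nil,
          pyRange_pos_empty _ e 2 (by omega) (by split_ifs <;> omega)]

lemma pyProd_eq_prod (xs : List Int) : pyProd xs = xs.prod :=
  Eq.symm List.prod_eq_foldl

-- A's conditional two-component fold splits into two filtered products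
lemma fold_split (c : Int → Bool) (g : Int → Int) (l : List Int) (a b : Int) :
    l.foldl (fun wh dim =>
        if c dim then (wh.1 * g dim, wh.2) else (wh.1, wh.2 * g dim)) (a, b)
      = (a * ((l.filter c).map g).prod, b * ((l.filter (fun x => !c x)).map g).prod) := by
  induction l generalizing a b with
  | nil => simp
  | cons x t ih =>
    by_cases hx : c x
    · simp [hx, ih, mul_assoc]
    · simp [hx, ih, mul_assoc]

-- ===== VERDICT (by name: the statement is the Claim_ definition above) =====
theorem get_width_height_spec : Claim_equal_get_width_height := by
  intro shape d color _ _
  unfold Spec_get_width_height get_width_height get_width_height_alt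
  simp only []
  rw [fold_split]
  rw [filter_even_pyRange (e := (shape.length : Int) - (if color then 1 else 0)) ((((shape.length : Int) - (if color then 1 else 0)) - d).toNat) d (le_refl _),
      filter_odd_pyRange ((((shape.length : Int) - (if color then 1 else 0)) - d).toNat) d _ (le_refl _)]
  simp [pyProd_eq_prod]
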